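-- pv_equiv track=rewrite | github.com/wangguangyuabc/WGY_LOVE_LZQ | game/rule.py | generate_all_action
-- ===== SOURCE A (Python) =====
-- def generate_all_action(situation, dice, player):
--     if player == -1:
--         dice = -dice
--     legal_chess = []
--     if any(dice in b for b in situation):
--         legal_chess.append(abs(dice))
--     else:
--         count = 0
--         while (dice - count) >= 1 and (dice - count) <= 6:
--             if any((dice - count) in b for b in situation):
--                 legal_chess.append(abs(dice - count))
--                 break
--             count += 1
--         count = 0
--         while (dice + count) >= 1 and (dice + count) <= 6:
--             if any((dice + count) in b for b in situation):
--                 legal_chess.append(abs(dice + count))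
--                 break
--             count += 1
--         count = 0
--         while (dice - count) >= -6 and (dice - count) <= -1:
--             if any((dice - count) in b for b in situation):
--                 legal_chess.append(abs(dice - count))
--                 break
--             count += 1
--         count = 0
--         while (dice + count) >= -6 and (dice + count) <= -1:
--             if any((dice + count) in b for b in situation):
--                 legal_chess.append(abs(dice + count))
--                 break
--             count += 1
--
--     return legal_chess
-- ===== SOURCE B (Python) =====
-- def generate_all_action(situation, dice, player):
--     if player == -1:
--         dice = -dice
--     occupied = set()
--     for b in situation:
--         occupied.update(b)
--     if dice in occupied:
--         return [abs(dice)]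
--     legal_chess = []
--     if 1 <= dice <= 6:
--         down = [v for v in occupied if 1 <= v <= dice]
--         if down:
--             legal_chess.append(abs(max(down)))
--         up = [v for v in occupied if dice <= v <= 6]
--         if up:
--             legal_chess.append(abs(min(up)))
--     elif -6 <= dice <= -1:
--         down = [v for v in occupied if -6 <= v <= dice]
--         if down:
--             legal_chess.append(abs(max(down)))
--         up = [v for v in occupied if dice <= v <= -1]
--         if up:
--             legal_chess.append(abs(min(up)))
--     return legal_chess
-- ===== Notes on version B (the rewrite author's own statement) =====
-- stated objective: simpler
-- what changed: Replaces A's four count-incrementing while-scans over the board with a single occupied set built once, then max/min over range-filtered values to pick the nearest legal piece in each direction.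
import Mathlib
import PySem

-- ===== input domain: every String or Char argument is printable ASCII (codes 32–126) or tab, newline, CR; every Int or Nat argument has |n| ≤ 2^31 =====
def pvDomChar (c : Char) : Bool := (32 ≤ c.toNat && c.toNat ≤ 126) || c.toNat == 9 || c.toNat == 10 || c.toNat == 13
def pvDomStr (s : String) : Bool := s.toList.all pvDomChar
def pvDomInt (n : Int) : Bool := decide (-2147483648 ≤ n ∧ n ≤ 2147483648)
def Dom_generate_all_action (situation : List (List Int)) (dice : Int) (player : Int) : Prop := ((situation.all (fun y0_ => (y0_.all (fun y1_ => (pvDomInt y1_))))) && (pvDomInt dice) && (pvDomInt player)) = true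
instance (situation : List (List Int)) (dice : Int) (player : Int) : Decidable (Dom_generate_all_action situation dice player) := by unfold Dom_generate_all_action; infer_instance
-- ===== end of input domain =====

-- B replaces A's four bounded while-scans by one occupied-set built once plus max/min over filtered ranges (objective: simpler).


-- ===== PORT A =====
-- any(x in b for b in situation)
def gaaMemAny (situation : List (List Int)) (x : Int) : Bool :=
  situation.any (fun b => b.contains x)

-- A's 'while (dice - count) in [lo,hi]' loop; each loop runs at most 6 iterations, so fuel 7 is never exhausted
def gaaScanDown (situation : List (List Int)) (dice lo hi : Int) : Nat → Int → List Int
  | 0, _ => []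
  | fuel+1, count =>
    if lo ≤ dice - count ∧ dice - count ≤ hi then
      if gaaMemAny situation (dice - count) then [|dice - count|]
      else gaaScanDown situation dice lo hi fuel (count + 1)
    else []

-- A's 'while (dice + count) in [lo,hi]' loop
def gaaScanUp (situation : List (List Int)) (dice lo hi : Int) : Nat → Int → List Int
  | 0, _ => []
  | fuel+1, count =>
    if lo ≤ dice + count ∧ dice + count ≤ hi then
      if gaaMemAny situation (dice + count) then [|dice + count|]
      else gaaScanUp situation dice lo hi fuel (count + 1)
    else []

def generate_all_action (situation : List (List Int)) (dice : Int) (player : Int) : List Int :=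
  let dice := if player == -1 then -dice else dice
  if gaaMemAny situation dice then [|dice|]
  else
    gaaScanDown situation dice 1 6 7 0 ++ gaaScanUp situation dice 1 6 7 0 ++
    gaaScanDown situation dice (-6) (-1) 7 0 ++ gaaScanUp situation dice (-6) (-1) 7 0

-- ===== PORT B =====
-- occupied = set(); for b in situation: occupied.update(b)
def gaaOccupied (situation : List (List Int)) : PySem.Set Int :=
  situation.foldl (fun s b => PySem.Set.update s b) PySem.Set.empty

def generate_all_action_alt (situation : List (List Int)) (dice : Int) (player : Int) : List Int :=
  let dice := if player == -1 then -dice else dice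
  let occ := gaaOccupied situation
  if PySem.Set.contains occ dice then [|dice|]
  else if 1 ≤ dice ∧ dice ≤ 6 then
    (match PySem.List.max? (occ.filter (fun v => decide (1 ≤ v ∧ v ≤ dice))) (fun v => v) with
     | some m => [|m|] | none => []) ++
    (match PySem.List.min? (occ.filter (fun v => decide (dice ≤ v ∧ v ≤ 6))) (fun v => v) with
     | some m => [|m|] | none => [])
  else if -6 ≤ dice ∧ dice ≤ -1 then
    (match PySem.List.max? (occ.filter (fun v => decide (-6 ≤ v ∧ v ≤ dice))) (fun v => v) with
     | some m => [|m|] | none => []) ++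
    (match PySem.List.min? (occ.filter (fun v => decide (dice ≤ v ∧ v ≤ -1))) (fun v => v) with
     | some m => [|m|] | none => [])
  else []

-- ===== PRECONDITION & SPEC =====
def Spec_generate_all_action (situation : List (List Int)) (dice : Int) (player : Int) (out : List Int) : Prop := out = generate_all_action_alt situation dice player
instance (situation : List (List Int)) (dice : Int) (player : Int) (out : List Int) : Decidable (Spec_generate_all_action situation dice player out) := by unfold Spec_generate_all_action; infer_instance

-- ===== CLAIM (what is proved, stated in full; the proofs are below) =====
def Claim_equal_generate_all_action : Prop := ∀ (situation : List (List Int)) (dice : Int) (player : Int), Dom_generate_all_action situation dice player → Spec_generate_all_action situation dice player (generate_all_action situation dice player)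

-- ===== LEMMAS AND PROOFS =====

theorem mem_gaaOccupied (situation : List (List Int)) (x : Int) :
    x ∈ gaaOccupied situation ↔ gaaMemAny situation x = true := by
  unfold gaaOccupied gaaMemAny
  suffices h : ∀ (l : List (List Int)) (s : PySem.Set Int),
      x ∈ l.foldl (fun s b => PySem.Set.update s b) s ↔ x ∈ s ∨ l.any (fun b => b.contains x) = true by
    simpa using h situation PySem.Set.empty
  intro l
  induction l with
  | nil => simp
  | cons b t ih =>
    intro s
    simp [List.foldl_cons, ih, PySem.Set.mem_update, or_assoc]

theorem contains_gaaOccupied (situation : List (List Int)) (x : Int) :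
    PySem.Set.contains (gaaOccupied situation) x = gaaMemAny situation x := by
  have h := mem_gaaOccupied situation x
  by_cases hx : gaaMemAny situation x = true
  · simp only [hx]
    simpa [PySem.Set.contains] using h.mpr hx
  · simp only [Bool.not_eq_true] at hx
    simp only [hx]
    simp only [hx] at h
    simpa [PySem.Set.contains] using h

theorem gaaScanDown_out (situation : List (List Int)) (dice lo hi count : Int)
    (h : ¬ (lo ≤ dice - count ∧ dice - count ≤ hi)) (fuel : Nat) :
    gaaScanDown situation dice lo hi fuel count = [] := by
  cases fuel with
  | zero => rfl
  | succ n => rw [gaaScanDown, if_neg h]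

theorem gaaScanUp_out (situation : List (List Int)) (dice lo hi count : Int)
    (h : ¬ (lo ≤ dice + count ∧ dice + count ≤ hi)) (fuel : Nat) :
    gaaScanUp situation dice lo hi fuel count = [] := by
  cases fuel with
  | zero => rfl
  | succ n => rw [gaaScanUp, if_neg h]

theorem gaaScanDown_eq (situation : List (List Int)) (lo hi : Int) :
    ∀ (fuel : Nat) (dice count : Int), (dice - count - lo).toNat < fuel →
      lo ≤ dice - count → dice - count ≤ hi →
      gaaScanDown situation dice lo hi fuel count =
        (match PySem.List.max? ((gaaOccupied situation).filter
            (fun v => decide (lo ≤ v ∧ v ≤ dice - count))) (fun v => v) with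
         | some m => [|m|] | none => []) := by
  intro fuel
  induction fuel with
  | zero => intro dice count hf _ _; omega
  | succ n ih =>
    intro dice count hf h1 h2
    rw [gaaScanDown]
    rw [if_pos ⟨h1, h2⟩]
    by_cases hm : gaaMemAny situation (dice - count) = true
    · rw [if_pos hm]
      have hmemf : (dice - count) ∈ (gaaOccupied situation).filter
          (fun v => decide (lo ≤ v ∧ v ≤ dice - count)) := by
        rw [List.mem_filter]
        exact ⟨(mem_gaaOccupied situation _).mpr hm, by simp; omega⟩
      obtain ⟨m, hmax⟩ : ∃ m, PySem.List.max? ((gaaOccupied situation).filter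
          (fun v => decide (lo ≤ v ∧ v ≤ dice - count))) (fun v => v) = some m := by
        cases hx : PySem.List.max? ((gaaOccupied situation).filter
            (fun v => decide (lo ≤ v ∧ v ≤ dice - count))) (fun v => v) with
        | none =>
          rw [PySem.List.max?_eq_none_iff] at hx
          rw [hx] at hmemf; simp at hmemf
        | some m => exact ⟨m, rfl⟩
      have hmle : m ≤ dice - count := by
        have := PySem.List.max?_mem hmax
        rw [List.mem_filter] at this
        have := this.2; simp at this; omega
      have hlem : dice - count ≤ m := PySem.List.max?_isMax hmax _ hmemf
      rw [hmax]
      have : m = dice - count := le_antisymm hmle hlem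
      rw [this]
    · rw [if_neg hm]
      have hfilter : (gaaOccupied situation).filter (fun v => decide (lo ≤ v ∧ v ≤ dice - count))
          = (gaaOccupied situation).filter (fun v => decide (lo ≤ v ∧ v ≤ dice - count - 1)) := by
        apply List.filter_congr
        intro v hv
        have hne : v ≠ dice - count := by
          intro he
          exact hm (by rw [← he] at hm ⊢; exact (mem_gaaOccupied situation v).mp hv)
        simp only [decide_eq_decide]
        omega
      by_cases hlo : lo ≤ dice - (count + 1)
      · have := ih dice (count + 1) (by omega) hlo (by omega)
        rw [this, hfilter]
        have heq : dice - (count + 1) = dice - count - 1 := by ring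
        rw [heq]
      · rw [gaaScanDown_out situation dice lo hi (count + 1) (by omega)]
        have hnil : (gaaOccupied situation).filter
            (fun v => decide (lo ≤ v ∧ v ≤ dice - count - 1)) = [] := by
          rw [List.filter_eq_nil_iff]
          intro v _
          simp only [decide_eq_true_eq, not_and]
          omega
        rw [hfilter, hnil]
        simp [PySem.List.max?]

theorem gaaScanUp_eq (situation : List (List Int)) (lo hi : Int) :
    ∀ (fuel : Nat) (dice count : Int), (hi - (dice + count)).toNat < fuel →
      lo ≤ dice + count → dice + count ≤ hi →
      gaaScanUp situation dice lo hi fuel count =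
        (match PySem.List.min? ((gaaOccupied situation).filter
            (fun v => decide (dice + count ≤ v ∧ v ≤ hi))) (fun v => v) with
         | some m => [|m|] | none => []) := by
  intro fuel
  induction fuel with
  | zero => intro dice count hf _ _; omega
  | succ n ih =>
    intro dice count hf h1 h2
    rw [gaaScanUp]
    rw [if_pos ⟨h1, h2⟩]
    by_cases hm : gaaMemAny situation (dice + count) = true
    · rw [if_pos hm]
      have hmemf : (dice + count) ∈ (gaaOccupied situation).filter
          (fun v => decide (dice + count ≤ v ∧ v ≤ hi)) := by
        rw [List.mem_filter]
        exact ⟨(mem_gaaOccupied situation _).mpr hm, by simp; omega⟩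
      obtain ⟨m, hmin⟩ : ∃ m, PySem.List.min? ((gaaOccupied situation).filter
          (fun v => decide (dice + count ≤ v ∧ v ≤ hi))) (fun v => v) = some m := by
        cases hx : PySem.List.min? ((gaaOccupied situation).filter
            (fun v => decide (dice + count ≤ v ∧ v ≤ hi))) (fun v => v) with
        | none =>
          rw [PySem.List.min?_eq_none_iff] at hx
          rw [hx] at hmemf; simp at hmemf
        | some m => exact ⟨m, rfl⟩
      have hmge : dice + count ≤ m := by
        have := PySem.List.min?_mem hmin
        rw [List.mem_filter] at this
        have := this.2; simp at this; omega
      have hgem : m ≤ dice + count := PySem.List.min?_isMin hmin _ hmemf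
      rw [hmin]
      have : m = dice + count := le_antisymm hgem hmge
      rw [this]
    · rw [if_neg hm]
      have hfilter : (gaaOccupied situation).filter (fun v => decide (dice + count ≤ v ∧ v ≤ hi))
          = (gaaOccupied situation).filter (fun v => decide (dice + count + 1 ≤ v ∧ v ≤ hi)) := by
        apply List.filter_congr
        intro v hv
        have hne : v ≠ dice + count := by
          intro he
          exact hm (by rw [← he] at hm ⊢; exact (mem_gaaOccupied situation v).mp hv)
        simp only [decide_eq_decide]
        omega
      by_cases hhi : dice + (count + 1) ≤ hi
      · have := ih dice (count + 1) (by omega) (by omega) hhi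
        rw [this, hfilter]
        have heq : dice + (count + 1) = dice + count + 1 := by ring
        rw [heq]
      · rw [gaaScanUp_out situation dice lo hi (count + 1) (by omega)]
        have hnil : (gaaOccupied situation).filter
            (fun v => decide (dice + count + 1 ≤ v ∧ v ≤ hi)) = [] := by
          rw [List.filter_eq_nil_iff]
          intro v _
          simp only [decide_eq_true_eq, not_and]
          omega
        rw [hfilter, hnil]
        simp [PySem.List.min?]

-- ===== VERDICT (by name: the statement is the Claim_ definition above) =====
theorem generate_all_action_spec : Claim_equal_generate_all_action := by
  intro situation dice player _
  unfold Spec_generate_all_action generate_all_action generate_all_action_alt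
  simp only []
  set d := if player == -1 then -dice else dice with hd
  rw [contains_gaaOccupied]
  by_cases h0 : gaaMemAny situation d = true
  · rw [if_pos h0, if_pos h0]
  · rw [if_neg h0, if_neg h0]
    by_cases h1 : 1 ≤ d ∧ d ≤ 6
    · rw [if_pos h1]
      rw [gaaScanDown_eq situation 1 6 7 d 0 (by omega) (by omega) (by omega)]
      rw [gaaScanUp_eq situation 1 6 7 d 0 (by omega) (by omega) (by omega)]
      rw [gaaScanDown_out situation d (-6) (-1) 0 (by omega)]
      rw [gaaScanUp_out situation d (-6) (-1) 0 (by omega)]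
      have hz : d - 0 = d := by ring
      have hz' : d + 0 = d := by ring
      rw [hz, hz']
      simp
    · rw [if_neg h1]
      by_cases h2 : -6 ≤ d ∧ d ≤ -1
      · rw [if_pos h2]
        rw [gaaScanDown_out situation d 1 6 0 (by omega)]
        rw [gaaScanUp_out situation d 1 6 0 (by omega)]
        rw [gaaScanDown_eq situation (-6) (-1) 7 d 0 (by omega) (by omega) (by omega)]
        rw [gaaScanUp_eq situation (-6) (-1) 7 d 0 (by omega) (by omega) (by omega)]
        have hz : d - 0 = d := by ring
        have hz' : d + 0 = d := by ring
        rw [hz, hz']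
        simp
      · rw [if_neg h2]
        rw [gaaScanDown_out situation d 1 6 0 (by omega)]
        rw [gaaScanUp_out situation d 1 6 0 (by omega)]
        rw [gaaScanDown_out situation d (-6) (-1) 0 (by omega)]
        rw [gaaScanUp_out situation d (-6) (-1) 0 (by omega)]
        rfl
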